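-- pv_equiv track=rewrite | github.com/Donghyun-34/Algorithm | 코테 준비/코테_Py/solution2.py | check_del
-- ===== SOURCE A (Python) =====
-- def check_del(cur_idx, cont, del_idx, state):
--     cnt = 0
--     # U에 대한 체크
--     if state == 1:
--         for i in range(1, cont+1):
--             tmp = cur_idx - i
--             try:
--                 if del_idx.index(tmp) != -1:
--                     cnt += 1
--             except ValueError:
--                 pass
--     # D에 대한 체크
--     else:
--         for i in range(1, cont + 1):
--             tmp = cur_idx + i
--             try:
--                 if del_idx.index(tmp) != -1:
--                     cnt += 1
--             except ValueError:
--                 pass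
--
--     return cnt
-- ===== SOURCE B (Python) =====
-- def check_del(cur_idx, cont, del_idx, state):
--     if state == 1:
--         lo, hi = cur_idx - cont, cur_idx - 1
--     else:
--         lo, hi = cur_idx + 1, cur_idx + cont
--     return sum(1 for x in set(del_idx) if lo <= x <= hi)
-- ===== Notes on version B (the rewrite author's own statement) =====
-- stated objective: simpler
-- what changed: B computes the inclusive candidate interval from state/cont and counts the distinct values of del_idx lying in it, replacing A's loop over the candidate range with a per-candidate list.index scan (and its try/except).
import Mathlib
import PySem

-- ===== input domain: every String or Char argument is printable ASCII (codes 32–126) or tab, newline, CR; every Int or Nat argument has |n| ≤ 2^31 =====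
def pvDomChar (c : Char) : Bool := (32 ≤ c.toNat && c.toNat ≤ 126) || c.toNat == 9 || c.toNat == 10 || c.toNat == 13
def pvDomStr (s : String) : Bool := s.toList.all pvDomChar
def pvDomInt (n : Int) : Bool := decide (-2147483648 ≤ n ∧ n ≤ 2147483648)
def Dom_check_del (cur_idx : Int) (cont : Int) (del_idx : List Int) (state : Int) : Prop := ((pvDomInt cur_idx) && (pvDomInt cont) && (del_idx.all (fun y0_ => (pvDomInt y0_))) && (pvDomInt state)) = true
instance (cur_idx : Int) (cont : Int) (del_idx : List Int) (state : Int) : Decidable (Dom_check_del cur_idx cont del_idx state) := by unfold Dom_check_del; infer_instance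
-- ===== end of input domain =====

-- B replaces A's loop over the candidate range (with a list.index scan per candidate)
-- by counting the distinct values of del_idx that fall in the inclusive candidate interval: simpler.

-- ===== PORT A =====
def check_del (cur_idx : Int) (cont : Int) (del_idx : List Int) (state : Int) : Int :=
  -- cnt = 0; two symmetric loops over range(1, cont+1); del_idx.index(tmp) raises ValueError iff tmp ∉ del_idx
  if state == 1 then
    (PySem.List.pyRange 1 (cont + 1) 1).foldl (fun cnt i =>
      let tmp := cur_idx - i
      match PySem.List.index? del_idx tmp with
      | some j => if (j : Int) ≠ -1 then cnt + 1 else cnt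
      | none => cnt) 0
  else
    (PySem.List.pyRange 1 (cont + 1) 1).foldl (fun cnt i =>
      let tmp := cur_idx + i
      match PySem.List.index? del_idx tmp with
      | some j => if (j : Int) ≠ -1 then cnt + 1 else cnt
      | none => cnt) 0

-- ===== PORT B =====
def check_del_alt (cur_idx : Int) (cont : Int) (del_idx : List Int) (state : Int) : Int :=
  let p := if state == 1 then (cur_idx - cont, cur_idx - 1) else (cur_idx + 1, cur_idx + cont)
  -- sum(1 for x in set(del_idx) if lo <= x <= hi): order-independent consumption of the set
  (PySem.Set.ofList del_idx).foldl (fun c x => if p.1 ≤ x ∧ x ≤ p.2 then c + 1 else c) 0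

-- ===== PRECONDITION & SPEC =====
def Spec_check_del (cur_idx : Int) (cont : Int) (del_idx : List Int) (state : Int) (out : Int) : Prop := out = check_del_alt cur_idx cont del_idx state
instance (cur_idx : Int) (cont : Int) (del_idx : List Int) (state : Int) (out : Int) : Decidable (Spec_check_del cur_idx cont del_idx state out) := by unfold Spec_check_del; infer_instance

-- ===== CLAIM (what is proved, stated in full; the proofs are below) =====
def Claim_equal_check_del : Prop := ∀ (cur_idx : Int) (cont : Int) (del_idx : List Int) (state : Int), Dom_check_del cur_idx cont del_idx state → Spec_check_del cur_idx cont del_idx state (check_del cur_idx cont del_idx state)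

-- ===== LEMMAS AND PROOFS =====

-- A's loop body is a membership test: index? returns a Nat, never -1
theorem stepA (l : List Int) (t : Int) (c : Int) :
    (match PySem.List.index? l t with
      | some j => if (j : Int) ≠ -1 then c + 1 else c
      | none => c) = if t ∈ l then c + 1 else c := by
  cases h : PySem.List.index? l t with
  | none =>
      have : t ∉ l := (PySem.List.index?_eq_none_iff l t).mp h
      simp [this]
  | some j =>
      have ht : t ∈ l := (PySem.List.index?_isSome_iff l t).mp (by rw [h]; rfl)
      have hj : (j : Int) ≠ -1 := by omega
      simp [ht, hj]

-- splitting a countP along a disjoint disjunction of tests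
theorem countP_split (l : List Int) (p q r : Int → Bool)
    (h : ∀ x, p x = (q x || r x)) (hd : ∀ x, ¬(q x = true ∧ r x = true)) :
    l.countP p = l.countP q + l.countP r := by
  induction l with
  | nil => simp
  | cons a l ih =>
      have ha := h a
      have hda := hd a
      rw [List.countP_cons, List.countP_cons, List.countP_cons, ih, ha]
      by_cases hq : q a = true
      · by_cases hr : r a = true
        · exact absurd ⟨hq, hr⟩ hda
        · simp [hq, hr]; omega
      · by_cases hr : r a = true <;> simp [hq, hr] <;> omega

-- counting one value in a nodup list
theorem countP_eq_of_nodup (l : List Int) (v : Int) (hn : l.Nodup) :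
    l.countP (fun x => decide (x = v)) = if v ∈ l then 1 else 0 := by
  induction l with
  | nil => simp
  | cons a l ih =>
      rcases List.nodup_cons.mp hn with ⟨ha, hl⟩
      by_cases h : a = v
      · subst h
        have h0 : l.countP (fun x => decide (x = a)) = 0 :=
          List.countP_eq_zero.mpr (by intro x hx; simp only [decide_eq_true_eq]; rintro rfl; exact ha hx)
        simp [List.countP_cons, h0]
      · have hv : (v ∈ a :: l) ↔ v ∈ l := by
          constructor
          · intro hm
            rcases List.mem_cons.mp hm with rfl | hm'
            · exact absurd rfl h
            · exact hm'
          · exact fun hm => List.mem_cons_of_mem a hm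
        simp [List.countP_cons, h, ih hl, hv]

-- key lemma, U direction: interval grows at the low end
theorem keyU (l : List Int) (c : Int) (n : Nat) :
    (List.range n).countP (fun (k : Nat) => decide (c - (1 + (k : Int)) ∈ l)) =
    (PySem.List.dedup l).countP (fun x => decide (c - (n : Int) ≤ x ∧ x ≤ c - 1)) := by
  induction n with
  | zero =>
      simp only [List.range_zero, List.countP_nil]
      symm
      apply List.countP_eq_zero.mpr
      intro x hx
      simp only [decide_eq_true_eq]
      omega
  | succ n ih =>
      rw [List.range_succ, List.countP_append, ih]
      have hsplit : (PySem.List.dedup l).countP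
            (fun x => decide (c - ((n : Int) + 1) ≤ x ∧ x ≤ c - 1)) =
          (PySem.List.dedup l).countP (fun x => decide (c - (n : Int) ≤ x ∧ x ≤ c - 1)) +
          (PySem.List.dedup l).countP (fun x => decide (x = c - (1 + (n : Int)))) := by
        apply countP_split
        · intro x
          have hiff : (c - ((n : Int) + 1) ≤ x ∧ x ≤ c - 1) ↔
              ((c - (n : Int) ≤ x ∧ x ≤ c - 1) ∨ x = c - (1 + (n : Int))) := by omega
          simp only [hiff, Bool.decide_or]
        · intro x
          simp only [decide_eq_true_eq]
          rintro ⟨⟨h1, _⟩, h2⟩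
          omega
      push_cast
      rw [hsplit, countP_eq_of_nodup _ _ (PySem.List.nodup_dedup l)]
      simp only [PySem.List.mem_dedup]
      by_cases h : c - (1 + (n : Int)) ∈ l <;>
        simp [List.countP_cons, h]

-- key lemma, D direction: interval grows at the high end
theorem keyD (l : List Int) (c : Int) (n : Nat) :
    (List.range n).countP (fun (k : Nat) => decide (c + (1 + (k : Int)) ∈ l)) =
    (PySem.List.dedup l).countP (fun x => decide (c + 1 ≤ x ∧ x ≤ c + (n : Int))) := by
  induction n with
  | zero =>
      simp only [List.range_zero, List.countP_nil]
      symm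
      apply List.countP_eq_zero.mpr
      intro x hx
      simp only [decide_eq_true_eq]
      omega
  | succ n ih =>
      rw [List.range_succ, List.countP_append, ih]
      have hsplit : (PySem.List.dedup l).countP
            (fun x => decide (c + 1 ≤ x ∧ x ≤ c + ((n : Int) + 1))) =
          (PySem.List.dedup l).countP (fun x => decide (c + 1 ≤ x ∧ x ≤ c + (n : Int))) +
          (PySem.List.dedup l).countP (fun x => decide (x = c + (1 + (n : Int)))) := by
        apply countP_split
        · intro x
          have hiff : (c + 1 ≤ x ∧ x ≤ c + ((n : Int) + 1)) ↔
              ((c + 1 ≤ x ∧ x ≤ c + (n : Int)) ∨ x = c + (1 + (n : Int))) := by omega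
          simp only [hiff, Bool.decide_or]
        · intro x
          simp only [decide_eq_true_eq]
          rintro ⟨⟨_, h1⟩, h2⟩
          omega
      push_cast
      rw [hsplit, countP_eq_of_nodup _ _ (PySem.List.nodup_dedup l)]
      simp only [PySem.List.mem_dedup]
      by_cases h : c + (1 + (n : Int)) ∈ l <;>
        simp [List.countP_cons, h]

-- ===== VERDICT (by name: the statement is the Claim_ definition above) =====
theorem check_del_spec : Claim_equal_check_del := by
  intro cur_idx cont del_idx state _
  unfold Spec_check_del check_del check_del_alt
  have hset : PySem.Set.ofList del_idx = PySem.List.dedup del_idx := by simp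
  rw [hset]
  by_cases hs : state == 1
  · rw [if_pos hs, if_pos hs]
    rw [show (fun (cnt : Int) (i : Int) =>
          match PySem.List.index? del_idx (cur_idx - i) with
          | some j => if (j : Int) ≠ -1 then cnt + 1 else cnt
          | none => cnt) =
        (fun (cnt : Int) (i : Int) => if cur_idx - i ∈ del_idx then cnt + 1 else cnt)
        from funext fun cnt => funext fun i => stepA del_idx (cur_idx - i) cnt]
    rw [PySem.List.foldl_ite_add_one, PySem.List.foldl_ite_add_one, PySem.List.pyRange_one,
        List.countP_map]
    simp only [Function.comp_def]
    by_cases hc : 0 ≤ cont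
    · rw [show (cont + 1 - 1).toNat = cont.toNat from by omega,
          keyU del_idx cur_idx cont.toNat,
          show ((cont.toNat : Int)) = cont from by omega]
    · rw [show (cont + 1 - 1).toNat = 0 from by omega]
      simp only [List.range_zero, List.countP_nil]
      rw [List.countP_eq_zero.mpr (by intro x hx; simp only [decide_eq_true_eq]; omega)]
  · rw [if_neg hs, if_neg hs]
    rw [show (fun (cnt : Int) (i : Int) =>
          match PySem.List.index? del_idx (cur_idx + i) with
          | some j => if (j : Int) ≠ -1 then cnt + 1 else cnt
          | none => cnt) =
        (fun (cnt : Int) (i : Int) => if cur_idx + i ∈ del_idx then cnt + 1 else cnt)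
        from funext fun cnt => funext fun i => stepA del_idx (cur_idx + i) cnt]
    rw [PySem.List.foldl_ite_add_one, PySem.List.foldl_ite_add_one, PySem.List.pyRange_one,
        List.countP_map]
    simp only [Function.comp_def]
    by_cases hc : 0 ≤ cont
    · rw [show (cont + 1 - 1).toNat = cont.toNat from by omega,
          keyD del_idx cur_idx cont.toNat,
          show ((cont.toNat : Int)) = cont from by omega]
    · rw [show (cont + 1 - 1).toNat = 0 from by omega]
      simp only [List.range_zero, List.countP_nil]
      rw [List.countP_eq_zero.mpr (by intro x hx; simp only [decide_eq_true_eq]; omega)]
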